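-- pv_equiv track=rewrite | github.com/prosyslab/expecto-artifact | analyzer/figure_generator.py | _format_benchmark_caption
-- ===== SOURCE A (Python) =====
-- from collections.abc import Sequence
--
-- def _format_benchmark_tex(name: str) -> str:
--     normalized = name.strip()
--     if normalized.lower() == "apps":
--         return "\\apps{}"
--     if normalized.lower() in {"humanevalplus", "human eval+", "humaneval+"}:
--         return "\\humanevalplus{}"
--     return normalized
--
-- def _benchmark_sort_key(name: str) -> tuple[int, str]:
--     normalized = name.lower()
--     if normalized in {"humanevalplus", "human eval+", "humaneval+"}:
--         return (0, name)
--     if normalized == "apps":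
--         return (1, name)
--     return (2, name)
--
-- def _format_benchmark_caption(benchmarks: Sequence[str]) -> str:
--     ordered = sorted(dict.fromkeys(benchmarks), key=_benchmark_sort_key)
--     benchmark_names = [_format_benchmark_tex(name) for name in ordered]
--     if not benchmark_names:
--         return "benchmarks"
--     if len(benchmark_names) == 1:
--         return f"{benchmark_names[0]} benchmark"
--     if len(benchmark_names) == 2:
--         return f"{benchmark_names[0]} and {benchmark_names[1]} benchmarks"
--     return f"{', '.join(benchmark_names[:-1])}, and {benchmark_names[-1]} benchmarks"
-- ===== SOURCE B (Python) =====
-- def _format_benchmark_tex(name: str) -> str: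
--     normalized = name.strip()
--     if normalized.lower() == "apps":
--         return "\\apps{}"
--     if normalized.lower() in {"humanevalplus", "human eval+", "humaneval+"}:
--         return "\\humanevalplus{}"
--     return normalized
--
-- def _format_benchmark_caption(benchmarks):
--     # dedupe keeping first occurrences, then bucket by priority class in one pass
--     hep, apps, other = [], [], []
--     for name in dict.fromkeys(benchmarks):
--         low = name.lower()
--         if low in ("humanevalplus", "human eval+", "humaneval+"):
--             hep.append(name)
--         elif low == "apps":
--             apps.append(name)
--         else:
--             other.append(name)
--     names = [_format_benchmark_tex(n) for n in sorted(hep) + sorted(apps) + sorted(other)]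
--     if not names:
--         return "benchmarks"
--     if len(names) == 1:
--         return names[0] + " benchmark"
--     sep = ", and " if len(names) > 2 else " and "
--     return ", ".join(names[:-1]) + sep + names[-1] + " benchmarks"
-- ===== Notes on version B (the rewrite author's own statement) =====
-- stated objective: alternative
-- what changed: Replaces the single sorted() with a tuple (priority, name) key by a one-pass partition of the deduped names into three priority buckets, each bucket sorted by plain name and concatenated, and folds the 2-vs-many grammar cases into one join-with-separator expression.
import Mathlib
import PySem

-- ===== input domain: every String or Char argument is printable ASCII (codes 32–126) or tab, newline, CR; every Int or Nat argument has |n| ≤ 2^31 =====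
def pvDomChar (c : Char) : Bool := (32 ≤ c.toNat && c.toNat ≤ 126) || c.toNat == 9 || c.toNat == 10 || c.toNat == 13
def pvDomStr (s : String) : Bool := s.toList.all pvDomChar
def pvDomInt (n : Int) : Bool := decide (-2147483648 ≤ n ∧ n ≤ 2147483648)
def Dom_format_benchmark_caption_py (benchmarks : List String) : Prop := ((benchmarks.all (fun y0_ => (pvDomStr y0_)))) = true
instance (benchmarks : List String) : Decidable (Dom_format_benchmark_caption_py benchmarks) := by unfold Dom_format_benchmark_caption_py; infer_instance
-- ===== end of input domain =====

-- B partitions the deduped names into three priority buckets in one pass, sorts each bucket by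
-- name and concatenates, instead of A's single sort with a tuple key (objective: alternative).


-- ===== PORT A =====
-- _format_benchmark_tex (identical helper in both Pythons)
def pvTex (name : String) : String :=
  let normalized := PySem.Str.strip name
  if PySem.Str.lower normalized = "apps" then "\\apps{}"
  else if PySem.Str.lower normalized ∈ (["humanevalplus", "human eval+", "humaneval+"] : List String) then "\\humanevalplus{}"
  else normalized

-- _benchmark_sort_key: the Int component of the (int, str) tuple key (the str component is the name itself)
def pvKeyPrio (name : String) : Int :=
  let normalized := PySem.Str.lower name
  if normalized ∈ (["humanevalplus", "human eval+", "humaneval+"] : List String) then 0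
  else if normalized = "apps" then 1
  else 2

def format_benchmark_caption_py (benchmarks : List String) : String :=
  let ordered := PySem.List.sorted2 (PySem.List.dedup benchmarks) pvKeyPrio (fun name => name) false
  let benchmark_names := ordered.map pvTex
  if benchmark_names.length = 0 then "benchmarks"
  else if benchmark_names.length = 1 then PySem.List.pyGetD benchmark_names 0 "" ++ " benchmark"
  else if benchmark_names.length = 2 then
    PySem.List.pyGetD benchmark_names 0 "" ++ " and " ++ PySem.List.pyGetD benchmark_names 1 "" ++ " benchmarks"
  else
    PySem.Str.join ", " (PySem.List.slice benchmark_names none (some (-1))) ++ ", and "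
      ++ PySem.List.pyGetD benchmark_names (-1) "" ++ " benchmarks"

-- ===== PORT B =====
-- one pass over the deduped names, appending each to its priority bucket
def pvBuckets (xs : List String) : List String × List String × List String :=
  xs.foldl (fun acc name =>
    let low := PySem.Str.lower name
    if low ∈ (["humanevalplus", "human eval+", "humaneval+"] : List String) then (acc.1 ++ [name], acc.2.1, acc.2.2)
    else if low = "apps" then (acc.1, acc.2.1 ++ [name], acc.2.2)
    else (acc.1, acc.2.1, acc.2.2 ++ [name])) ([], [], [])

def format_benchmark_caption_py_alt (benchmarks : List String) : String :=
  let b := pvBuckets (PySem.List.dedup benchmarks)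
  let ordered := PySem.List.sorted b.1 (fun x => x) false ++ PySem.List.sorted b.2.1 (fun x => x) false
      ++ PySem.List.sorted b.2.2 (fun x => x) false
  let names := ordered.map pvTex
  if names.length = 0 then "benchmarks"
  else if names.length = 1 then PySem.List.pyGetD names 0 "" ++ " benchmark"
  else
    let sep := if names.length > 2 then ", and " else " and "
    PySem.Str.join ", " (PySem.List.slice names none (some (-1))) ++ sep
      ++ PySem.List.pyGetD names (-1) "" ++ " benchmarks"

-- ===== PRECONDITION & SPEC =====
def Spec_format_benchmark_caption_py (benchmarks : List String) (out : String) : Prop := out = format_benchmark_caption_py_alt benchmarks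
instance (benchmarks : List String) (out : String) : Decidable (Spec_format_benchmark_caption_py benchmarks out) := by unfold Spec_format_benchmark_caption_py; infer_instance

-- ===== CLAIM (what is proved, stated in full; the proofs are below) =====
def Claim_equal_format_benchmark_caption_py : Prop := ∀ (benchmarks : List String), Dom_format_benchmark_caption_py benchmarks → Spec_format_benchmark_caption_py benchmarks (format_benchmark_caption_py benchmarks)

-- ===== LEMMAS AND PROOFS =====

-- A's tuple-key sort is the sort by the lexicographic key x ↦ (k1 x, k2 x)
theorem pv_sorted2_eq_sorted_toLex {α κ₁ κ₂ : Type} [LinearOrder κ₁] [LinearOrder κ₂]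
    (xs : List α) (k1 : α → κ₁) (k2 : α → κ₂) :
    PySem.List.sorted2 xs k1 k2 false = PySem.List.sorted xs (fun x => toLex (k1 x, k2 x)) false := by
  rw [PySem.List.sorted_eq_foldl_insertBy]
  unfold PySem.List.sorted2
  have hcmp : (fun a b => decide (k1 a < k1 b) || (!decide (k1 b < k1 a) && decide (k2 a < k2 b)))
      = (fun a b : α => decide ((fun x => toLex (k1 x, k2 x)) a < (fun x => toLex (k1 x, k2 x)) b)) := by
    funext a b
    simp only [Prod.Lex.toLex_lt_toLex]
    rcases lt_trichotomy (k1 a) (k1 b) with h | h | h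
    · simp [h]
    · simp [h]
    · simp [h, not_lt_of_gt h, ne_of_gt h]
  simp only [if_neg (by decide : ¬ (false = true))]
  rw [hcmp]

theorem pv_prio0 (n : String) (h : PySem.Str.lower n ∈ (["humanevalplus", "human eval+", "humaneval+"] : List String)) :
    pvKeyPrio n = 0 := by simp [pvKeyPrio, h]

theorem pv_prio1 (n : String) (h1 : PySem.Str.lower n ∉ (["humanevalplus", "human eval+", "humaneval+"] : List String))
    (h2 : PySem.Str.lower n = "apps") : pvKeyPrio n = 1 := by simp [pvKeyPrio, h1, h2]

theorem pv_prio2 (n : String) (h1 : PySem.Str.lower n ∉ (["humanevalplus", "human eval+", "humaneval+"] : List String))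
    (h2 : ¬ PySem.Str.lower n = "apps") : pvKeyPrio n = 2 := by simp [pvKeyPrio, h1, h2]

theorem pv_buckets_spec (xs : List String) (h a o : List String) :
    xs.foldl (fun acc name =>
      let low := PySem.Str.lower name
      if low ∈ (["humanevalplus", "human eval+", "humaneval+"] : List String) then (acc.1 ++ [name], acc.2.1, acc.2.2)
      else if low = "apps" then (acc.1, acc.2.1 ++ [name], acc.2.2)
      else (acc.1, acc.2.1, acc.2.2 ++ [name])) (h, a, o)
    = (h ++ xs.filter (fun n => pvKeyPrio n = 0), a ++ xs.filter (fun n => pvKeyPrio n = 1),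
       o ++ xs.filter (fun n => pvKeyPrio n = 2)) := by
  induction xs generalizing h a o with
  | nil => simp
  | cons x t ih =>
    simp only [List.foldl_cons, List.filter_cons]
    by_cases h1 : PySem.Str.lower x ∈ (["humanevalplus", "human eval+", "humaneval+"] : List String)
    · have hp := pv_prio0 x h1
      simp only [h1, if_true, ih, hp]
      simp
    · by_cases h2 : PySem.Str.lower x = "apps"
      · have hp := pv_prio1 x h1 h2
        simp only [h2, if_true, ih, hp]
        simp
      · have hp := pv_prio2 x h1 h2
        simp only [h1, h2, if_false, ih, hp]
        simp

theorem pv_prio_cases (n : String) : pvKeyPrio n = 0 ∨ pvKeyPrio n = 1 ∨ pvKeyPrio n = 2 := by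
  by_cases h1 : PySem.Str.lower n ∈ (["humanevalplus", "human eval+", "humaneval+"] : List String)
  · exact Or.inl (pv_prio0 n h1)
  · by_cases h2 : PySem.Str.lower n = "apps"
    · exact Or.inr (Or.inl (pv_prio1 n h1 h2))
    · exact Or.inr (Or.inr (pv_prio2 n h1 h2))

theorem pv_filter3_perm (xs : List String) :
    (xs.filter (fun n => pvKeyPrio n = 0) ++ xs.filter (fun n => pvKeyPrio n = 1)
      ++ xs.filter (fun n => pvKeyPrio n = 2)).Perm xs := by
  induction xs with
  | nil => simp
  | cons x t ih =>
    simp only [List.filter_cons]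
    rcases pv_prio_cases x with h | h | h
    · simp only [h]
      simpa using ih.cons x
    · refine List.Perm.trans ?_ (ih.cons x)
      simp only [h, List.append_assoc]
      norm_num
    · refine List.Perm.trans ?_ (ih.cons x)
      simp only [h, List.append_assoc]
      norm_num
      exact (List.Perm.append_left _ List.perm_middle).trans List.perm_middle

-- sorted bucket: strictly increasing names when the bucket has no duplicates
theorem pv_sorted_bucket_pairwise (l : List String) (hnd : l.Nodup) :
    (PySem.List.sorted l (fun x => x) false).Pairwise (· < ·) := by
  have hle := PySem.List.sorted_pairwise l (fun x => x) (κ := String)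
  have hnd' : (PySem.List.sorted l (fun x => x) false).Nodup :=
    (PySem.List.sorted_perm l (fun x => x) false).nodup_iff.mpr hnd
  exact (hnd'.and hle).imp (fun {a b} hab => lt_of_le_of_ne hab.2 hab.1)

-- the ordered lists of the two ports coincide on a duplicate-free list
theorem pv_ordered_eq (xs : List String) (hnd : xs.Nodup) :
    PySem.List.sorted2 xs pvKeyPrio (fun name => name) false
    = PySem.List.sorted (xs.filter (fun n => pvKeyPrio n = 0)) (fun x => x) false
      ++ PySem.List.sorted (xs.filter (fun n => pvKeyPrio n = 1)) (fun x => x) false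
      ++ PySem.List.sorted (xs.filter (fun n => pvKeyPrio n = 2)) (fun x => x) false := by
  rw [pv_sorted2_eq_sorted_toLex]
  refine PySem.List.sorted_eq_of_perm_of_pairwise_lt _ _ _ ?_ ?_
  · exact (((PySem.List.sorted_perm _ _ _).append (PySem.List.sorted_perm _ _ _)).append
      (PySem.List.sorted_perm _ _ _)).trans (pv_filter3_perm xs)
  · have hmem : ∀ (i : Int) (a : String),
        a ∈ PySem.List.sorted (xs.filter (fun n => pvKeyPrio n = i)) (fun x => x) false →
        pvKeyPrio a = i := by
      intro i a ha
      have := (PySem.List.mem_sorted _ _ _ _).mp ha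
      simpa using (List.mem_filter.mp this).2
    have hwithin : ∀ (i : Int),
        (PySem.List.sorted (xs.filter (fun n => pvKeyPrio n = i)) (fun x => x) false).Pairwise
          (fun a b => toLex (pvKeyPrio a, a) < toLex (pvKeyPrio b, b)) := by
      intro i
      have hpw := pv_sorted_bucket_pairwise (xs.filter (fun n => pvKeyPrio n = i)) (hnd.filter _)
      refine List.Pairwise.imp_of_mem ?_ hpw
      intro a b ha hb hab
      have h1 := hmem i a ha
      have h2 := hmem i b hb
      rw [Prod.Lex.toLex_lt_toLex]
      exact Or.inr ⟨by rw [h1, h2], hab⟩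
    have hacross : ∀ (i j : Int), i < j → ∀ a b,
        a ∈ PySem.List.sorted (xs.filter (fun n => pvKeyPrio n = i)) (fun x => x) false →
        b ∈ PySem.List.sorted (xs.filter (fun n => pvKeyPrio n = j)) (fun x => x) false →
        toLex (pvKeyPrio a, a) < toLex (pvKeyPrio b, b) := by
      intro i j hij a b ha hb
      rw [Prod.Lex.toLex_lt_toLex]
      exact Or.inl (by rw [hmem i a ha, hmem j b hb]; exact hij)
    rw [List.pairwise_append, List.pairwise_append]
    refine ⟨⟨hwithin 0, hwithin 1, ?_⟩, hwithin 2, ?_⟩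
    · intro a ha b hb
      exact hacross 0 1 (by norm_num) a b ha hb
    · intro a ha b hb
      rcases List.mem_append.mp ha with h | h
      · exact hacross 0 2 (by norm_num) a b h hb
      · exact hacross 1 2 (by norm_num) a b h hb

theorem pv_gram_eq (n : List String) :
    (if n.length = 0 then "benchmarks"
     else if n.length = 1 then PySem.List.pyGetD n 0 "" ++ " benchmark"
     else if n.length = 2 then
       PySem.List.pyGetD n 0 "" ++ " and " ++ PySem.List.pyGetD n 1 "" ++ " benchmarks"
     else PySem.Str.join ", " (PySem.List.slice n none (some (-1))) ++ ", and "
       ++ PySem.List.pyGetD n (-1) "" ++ " benchmarks")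
    = (if n.length = 0 then "benchmarks"
       else if n.length = 1 then PySem.List.pyGetD n 0 "" ++ " benchmark"
       else PySem.Str.join ", " (PySem.List.slice n none (some (-1)))
         ++ (if n.length > 2 then ", and " else " and ")
         ++ PySem.List.pyGetD n (-1) "" ++ " benchmarks") := by
  match n with
  | [] => rfl
  | [x] => rfl
  | [x, y] =>
    simp only [List.length_cons, List.length_nil]
    norm_num
    have h1 : PySem.List.slice [x, y] none (some (-1)) = [x] := by simp [PySem.List.slice]
    have h2 : PySem.List.pyGetD [x, y] (-1) "" = y := by
      simp [PySem.List.pyGetD, PySem.List.pyGet?_neg_one]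
    have h3 : PySem.Str.join ", " [x] = x := by simp [PySem.Str.join]
    have h4 : PySem.List.pyGetD [x, y] 0 "" = x := by
      simp [PySem.List.pyGetD, PySem.List.pyGet?, PySem.List.pyIdx?]
    have h5 : PySem.List.pyGetD [x, y] 1 "" = y := by
      simp [PySem.List.pyGetD, PySem.List.pyGet?, PySem.List.pyIdx?]
    simp [h1, h2, h3, h5]
  | x :: y :: z :: r =>
    have hl : (x :: y :: z :: r).length = r.length + 3 := by simp
    rw [hl]
    rw [if_neg (by omega), if_neg (by omega), if_neg (by omega),
        if_neg (by omega), if_neg (by omega), if_pos (by omega)]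

-- ===== VERDICT (by name: the statement is the Claim_ definition above) =====
theorem format_benchmark_caption_py_spec : Claim_equal_format_benchmark_caption_py := by
  intro benchmarks _
  show format_benchmark_caption_py benchmarks = format_benchmark_caption_py_alt benchmarks
  unfold format_benchmark_caption_py format_benchmark_caption_py_alt pvBuckets
  rw [pv_buckets_spec]
  rw [pv_ordered_eq (PySem.List.dedup benchmarks) (PySem.List.nodup_dedup benchmarks)]
  simp only [List.nil_append]
  exact pv_gram_eq _
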